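-- pv_equiv track=rewrite | github.com/gratach/linchat | chat_server.py | wegzuzahl
-- ===== SOURCE A (Python) =====
-- def wegzuzahl(weg):
-- 	l = len(weg)
-- 	i = 0
-- 	mul = 1
-- 	ges = 0
-- 	while i < l:
-- 		ges += (weg[i] + 1) * mul
-- 		mul *= 255
-- 		i += 1
-- 	return ges
-- ===== SOURCE B (Python) =====
-- def wegzuzahl(weg):
-- 	ges = 0
-- 	for i in range(len(weg) - 1, -1, -1):
-- 		ges = ges * 255 + (weg[i] + 1)
-- 	return ges
-- ===== Notes on version B (the rewrite author's own statement) =====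
-- stated objective: simpler
-- what changed: Replaces the forward pass that tracks an explicit power-of-255 multiplier with Horner's method: a reverse traversal maintaining only a running result scaled by 255 each step.
import Mathlib
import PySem

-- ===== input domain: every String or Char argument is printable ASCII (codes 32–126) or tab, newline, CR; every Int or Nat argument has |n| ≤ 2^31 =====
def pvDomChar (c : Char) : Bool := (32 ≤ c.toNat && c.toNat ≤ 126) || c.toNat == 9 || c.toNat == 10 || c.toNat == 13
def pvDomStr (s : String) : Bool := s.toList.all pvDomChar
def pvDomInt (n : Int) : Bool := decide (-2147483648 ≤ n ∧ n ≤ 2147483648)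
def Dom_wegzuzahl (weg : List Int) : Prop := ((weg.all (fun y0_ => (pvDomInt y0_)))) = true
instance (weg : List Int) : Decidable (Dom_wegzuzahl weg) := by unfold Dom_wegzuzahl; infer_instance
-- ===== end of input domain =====

-- B replaces A's forward pass with an explicit multiplier by Horner's method over the list in reverse (objective: simpler).

-- ===== PORT A =====
-- A's while loop walks i = 0..l-1 reading weg[i] in order, with state (mul, ges);
-- ported as a fold over the list elements with the same (mul, ges) state and update order.
def wegzuzahl (weg : List Int) : Int :=
  (weg.foldl (fun (s : Int × Int) w => (s.1 * 255, s.2 + (w + 1) * s.1)) (1, 0)).2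

-- ===== PORT B =====
-- B's loop runs i from len-1 down to 0 doing ges = ges*255 + (weg[i]+1); foldr processes
-- the last element first with exactly that update.
def wegzuzahl_alt (weg : List Int) : Int :=
  weg.foldr (fun w ges => ges * 255 + (w + 1)) 0

-- ===== PRECONDITION & SPEC =====
def Spec_wegzuzahl (weg : List Int) (out : Int) : Prop := out = wegzuzahl_alt weg
instance (weg : List Int) (out : Int) : Decidable (Spec_wegzuzahl weg out) := by unfold Spec_wegzuzahl; infer_instance

-- ===== CLAIM (what is proved, stated in full; the proofs are below) =====
def Claim_equal_wegzuzahl : Prop := ∀ (weg : List Int), Dom_wegzuzahl weg → Spec_wegzuzahl weg (wegzuzahl weg)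

-- ===== LEMMAS AND PROOFS =====
theorem wegzuzahl_loop_inv (ws : List Int) (mul ges : Int) :
    (ws.foldl (fun (s : Int × Int) w => (s.1 * 255, s.2 + (w + 1) * s.1)) (mul, ges)).2
      = ges + mul * ws.foldr (fun w g => g * 255 + (w + 1)) 0 := by
  induction ws generalizing mul ges with
  | nil => simp
  | cons w t ih => simp [List.foldl, List.foldr, ih]; ring

-- ===== VERDICT (by name: the statement is the Claim_ definition above) =====
theorem wegzuzahl_spec : Claim_equal_wegzuzahl := by
  intro weg _
  unfold Spec_wegzuzahl wegzuzahl wegzuzahl_alt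
  rw [wegzuzahl_loop_inv]; ring
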